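-- pv_equiv track=rewrite | github.com/nmcdev/meteva | meteva/perspact/perspective/p8_new.py | get_middle_veri_para
-- ===== SOURCE A (Python) =====
-- import copy
--
-- def get_middle_veri_para(veri_para):
--     nead_hmfc_methods = ["ts", "bias", "ets", "fal_rate", "hit_rate", "mis_rate"]
--     nead_abcd_methods = ["pc", "spc"]
--     nead_tase_methods = ['me', 'mae', 'mse', 'rmse']
--     mpara = copy.deepcopy(veri_para)
--     methods = veri_para["method"]
--     for method in methods:
--         if method in nead_hmfc_methods:
--             mpara["method"] = ["hmfn"]
--             break
--         if method in nead_abcd_methods: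
--             mpara["method"] = ["abcd"]
--             break
--         if method in nead_tase_methods:
--             mpara["method"] = ["tase"]
--
--     return mpara
-- ===== SOURCE B (Python) =====
-- import copy
--
-- def get_middle_veri_para(veri_para):
--     hmfc = {"ts", "bias", "ets", "fal_rate", "hit_rate", "mis_rate"}
--     abcd = {"pc", "spc"}
--     tase = {"me", "mae", "mse", "rmse"}
--     mpara = copy.deepcopy(veri_para)
--     methods = veri_para["method"]
--     decided = next((("hmfn" if m in hmfc else "abcd")
--                     for m in methods if m in hmfc or m in abcd), None)
--     if decided is not None:
--         mpara["method"] = [decided]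
--     elif any(m in tase for m in methods):
--         mpara["method"] = ["tase"]
--     return mpara
-- ===== Notes on version B (the rewrite author's own statement) =====
-- stated objective: simpler
-- what changed: Replaces the single interleaved break/no-break loop by two separate passes: next() over the methods filtered to hmfc/abcd picks the breaking decision, and only if none exists an any() pass decides the tase fallback.
import Mathlib
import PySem

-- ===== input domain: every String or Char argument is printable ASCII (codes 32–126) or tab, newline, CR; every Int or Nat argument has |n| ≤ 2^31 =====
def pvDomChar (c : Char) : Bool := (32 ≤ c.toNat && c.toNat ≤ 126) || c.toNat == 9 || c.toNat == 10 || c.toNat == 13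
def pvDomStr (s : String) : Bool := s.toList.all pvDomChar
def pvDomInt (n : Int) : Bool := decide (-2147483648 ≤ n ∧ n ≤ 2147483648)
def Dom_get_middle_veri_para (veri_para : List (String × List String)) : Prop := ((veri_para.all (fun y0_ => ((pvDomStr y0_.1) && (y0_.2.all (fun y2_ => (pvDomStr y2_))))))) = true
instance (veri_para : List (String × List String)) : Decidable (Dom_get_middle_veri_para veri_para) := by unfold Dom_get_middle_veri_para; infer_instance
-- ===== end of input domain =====

-- B replaces A's interleaved break/no-break loop by two separate passes (find the first
-- hmfc/abcd method, else an any-pass for tase); same return value on Pre_ (key "method" present).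

-- dict helpers on the association-list representation (lookup/assignment go through PySem.Dict)
def pvLookup (l : List (String × List String)) (k : String) : List String :=
  (PySem.Dict.mk l).getD k []
def pvSet (l : List (String × List String)) (k : String) (v : List String) : List (String × List String) :=
  ((PySem.Dict.mk l).insert k v).items

def pvHmfc : List String := ["ts", "bias", "ets", "fal_rate", "hit_rate", "mis_rate"]
def pvAbcd : List String := ["pc", "spc"]
def pvTase : List String := ["me", "mae", "mse", "rmse"]

-- ===== PORT A =====
-- A's for-loop with break: structural recursion carrying the (possibly tase-updated) mpara
def pvALoop (mpara : List (String × List String)) : List String → List (String × List String)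
  | [] => mpara
  | m :: rest =>
    if pvHmfc.contains m then pvSet mpara "method" ["hmfn"]
    else if pvAbcd.contains m then pvSet mpara "method" ["abcd"]
    else if pvTase.contains m then pvALoop (pvSet mpara "method" ["tase"]) rest
    else pvALoop mpara rest

def get_middle_veri_para (veri_para : List (String × List String)) : List (String × List String) :=
  let mpara := veri_para
  let methods := pvLookup veri_para "method"
  pvALoop mpara methods

-- ===== PORT B =====
def get_middle_veri_para_alt (veri_para : List (String × List String)) : List (String × List String) :=
  let mpara := veri_para
  let methods := pvLookup veri_para "method"
  match methods.find? (fun m => pvHmfc.contains m || pvAbcd.contains m) with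
  | some m => pvSet mpara "method" [if pvHmfc.contains m then "hmfn" else "abcd"]
  | none =>
    if methods.any (fun m => pvTase.contains m) then pvSet mpara "method" ["tase"] else mpara

-- ===== PRECONDITION & SPEC =====
-- Pre_: the Python raises KeyError when the key "method" is absent
def Pre_get_middle_veri_para (veri_para : List (String × List String)) : Prop :=
  "method" ∈ veri_para.map Prod.fst
instance (veri_para : List (String × List String)) : Decidable (Pre_get_middle_veri_para veri_para) := by unfold Pre_get_middle_veri_para; infer_instance

def pvWitness_get_middle_veri_para : (List (String × List String)) := [("method", ["ts", "me"])]

def Spec_get_middle_veri_para (veri_para : List (String × List String)) (out : List (String × List String)) : Prop := out = get_middle_veri_para_alt veri_para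
instance (veri_para : List (String × List String)) (out : List (String × List String)) : Decidable (Spec_get_middle_veri_para veri_para out) := by unfold Spec_get_middle_veri_para; infer_instance

-- ===== CLAIM (what is proved, stated in full; the proofs are below) =====
def Claim_equal_get_middle_veri_para : Prop := ∀ (veri_para : List (String × List String)), Dom_get_middle_veri_para veri_para → Pre_get_middle_veri_para veri_para → Spec_get_middle_veri_para veri_para (get_middle_veri_para veri_para)

-- ===== LEMMAS AND PROOFS =====

lemma pvSet_pvSet (l : List (String × List String)) (k : String) (v w : List String) :
    pvSet (pvSet l k v) k w = pvSet l k w := by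
  unfold pvSet
  rw [show PySem.Dict.mk (((PySem.Dict.mk l).insert k v).items) = (PySem.Dict.mk l).insert k v from rfl,
      PySem.Dict.insert_insert_self]

lemma pvALoop_eq (ms : List String) (d : List (String × List String)) :
    pvALoop d ms =
      match ms.find? (fun m => pvHmfc.contains m || pvAbcd.contains m) with
      | some m => pvSet d "method" [if pvHmfc.contains m then "hmfn" else "abcd"]
      | none =>
        if ms.any (fun m => pvTase.contains m) then pvSet d "method" ["tase"] else d := by
  induction ms generalizing d with
  | nil => simp [pvALoop]
  | cons m rest ih =>
    by_cases h1 : m ∈ pvHmfc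
    · simp [pvALoop, h1]
    · by_cases h2 : m ∈ pvAbcd
      · simp [pvALoop, h1, h2]
      · have hfind : List.find? (fun m => pvHmfc.contains m || pvAbcd.contains m) (m :: rest)
            = List.find? (fun m => pvHmfc.contains m || pvAbcd.contains m) rest := by
          simp [h1, h2]
        by_cases h3 : m ∈ pvTase
        · have hstep : pvALoop d (m :: rest) = pvALoop (pvSet d "method" ["tase"]) rest := by
            simp [pvALoop, h1, h2, h3]
          rw [hstep, ih, hfind]
          cases List.find? (fun m => pvHmfc.contains m || pvAbcd.contains m) rest with
          | none => simp [h3, pvSet_pvSet]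
          | some x => simp [pvSet_pvSet]
        · have hstep : pvALoop d (m :: rest) = pvALoop d rest := by
            simp [pvALoop, h1, h2, h3]
          have hany : (m :: rest).any (fun m => pvTase.contains m)
              = rest.any (fun m => pvTase.contains m) := by simp [h3]
          rw [hstep, ih, hfind, hany]

-- ===== VERDICT (by name: the statement is the Claim_ definition above) =====
theorem get_middle_veri_para_spec : Claim_equal_get_middle_veri_para := by
  intro vp _ _
  show get_middle_veri_para vp = get_middle_veri_para_alt vp
  simp only [get_middle_veri_para, get_middle_veri_para_alt]
  exact pvALoop_eq _ _
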